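-- pv_equiv track=rewrite | github.com/pypi-data/pypi-mirror-402 | packages/braincell/braincell-0.0.7.tar.gz/braincell-0.0.7/braincell/morph/_branch_tree.py | dhs_group_by_depth
-- ===== SOURCE A (Python) =====
-- def dhs_group_by_depth(depths_sorted, max_group_size):
--     """
--     Group row indices by node depth, from deepest (bottom) to shallowest (root),
--     ensuring each group contains only nodes at the same depth and does not exceed max_group_size.
--
--     Parameters
--     ----------
--     depths_sorted : list of int
--         List of node depths, sorted according to the matrix row order.
--     max_group_size : int
--         Maximum allowed size for each group.
--
--     Returns
--     -------
--     groups : list of list of int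
--         Each sublist contains row indices grouped together at the same depth.
--     """
--     n = len(depths_sorted)
--     groups = []
--     i = n - 1
--     while i >= 0:
--         group_depth = depths_sorted[i]
--         group = []
--         # Group together nodes at the same depth, up to max_group_size
--         while i >= 0 and depths_sorted[i] == group_depth and len(group) < max_group_size:
--             group.append(i)
--             i -= 1
--         groups.append(sorted(group))
--     groups.reverse()
--     return groups
-- ===== SOURCE B (Python) =====
-- def dhs_group_by_depth(depths_sorted, max_group_size):
--     """Forward single pass: find each maximal run of equal consecutive depths,
--     then emit its chunks front-to-back with the short leftover chunk FIRST
--     (size L % max_group_size, or max_group_size when that is 0), each chunk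
--     being a ready-made ascending range -- no per-group sort, no final reverse."""
--     n = len(depths_sorted)
--     groups = []
--     start = 0
--     while start < n:
--         end = start + 1
--         while end < n and depths_sorted[end] == depths_sorted[start]:
--             end += 1
--         size = (end - start) % max_group_size or max_group_size
--         j = start
--         while j < end:
--             groups.append(list(range(j, j + size)))
--             j += size
--             size = max_group_size
--         start = end
--     return groups
-- ===== Notes on version B (the rewrite author's own statement) =====
-- stated objective: alternative
-- what changed: Replaces A's backward element-by-element walk (build each group by appending descending indices, sort every group, reverse the group list) with a forward pass that first measures each maximal run of equal consecutive depths and then emits its chunks directly as ascending ranges with the leftover-sized chunk first (L % max, or max when 0), so no per-group sort and no final reverse are needed.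
import Mathlib
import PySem

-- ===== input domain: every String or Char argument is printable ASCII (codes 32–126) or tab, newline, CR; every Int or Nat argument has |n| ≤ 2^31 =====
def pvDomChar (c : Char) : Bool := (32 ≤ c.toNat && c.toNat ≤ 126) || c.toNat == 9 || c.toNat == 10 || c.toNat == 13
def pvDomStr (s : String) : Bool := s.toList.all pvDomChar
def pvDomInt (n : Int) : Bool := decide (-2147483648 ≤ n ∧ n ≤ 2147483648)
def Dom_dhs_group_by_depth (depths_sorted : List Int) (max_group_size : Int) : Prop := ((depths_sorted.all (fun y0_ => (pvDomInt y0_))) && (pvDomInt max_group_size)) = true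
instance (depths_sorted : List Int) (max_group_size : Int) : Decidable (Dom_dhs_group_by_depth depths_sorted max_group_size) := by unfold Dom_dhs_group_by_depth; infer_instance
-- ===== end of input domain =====

-- B is an alternative decomposition: one forward pass over maximal runs of equal
-- consecutive depths, emitting each run's chunks directly as ascending ranges with
-- the leftover-sized chunk first, instead of A's backward element-by-element walk
-- with a sort of every group and a final reverse of the group list.

-- ===== PORT A =====
-- inner `while i >= 0 and depths_sorted[i] == group_depth and len(group) < max_group_size`;
-- fuel is only a totality guard: call sites pass (i+1).toNat, an upper bound on the iterations
def innerA (l : List Int) (gd m : Int) : Nat → Int → List Int → List Int × Int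
  | 0, i, g => (g, i)
  | fuel + 1, i, g =>
    if 0 ≤ i ∧ PySem.List.pyGet? l i = some gd ∧ (g.length : Int) < m then
      innerA l gd m fuel (i - 1) (g ++ [i])
    else (g, i)

-- outer `while i >= 0` loop; acc is `groups`.  Fuel length+1 covers the whole loop whenever
-- max_group_size ≥ 1; with max_group_size ≤ 0 the Python loops forever (outside Pre_).
def outerA (l : List Int) (m : Int) : Nat → Int → List (List Int) → List (List Int)
  | 0, _, acc => acc
  | fuel + 1, i, acc =>
    if 0 ≤ i then
      match PySem.List.pyGet? l i with
      | none => acc   -- unreachable: 0 ≤ i < len l throughout the loop (IndexError guard)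
      | some gd =>
        outerA l m fuel (innerA l gd m (i + 1).toNat i []).2
          (acc ++ [PySem.List.sorted (innerA l gd m (i + 1).toNat i []).1 (fun x => x) false])
    else acc

def dhs_group_by_depth (depths_sorted : List Int) (max_group_size : Int) : List (List Int) :=
  (outerA depths_sorted max_group_size (depths_sorted.length + 1)
    ((depths_sorted.length : Int) - 1) []).reverse

-- ===== PORT B =====
-- inner `while end < n and depths_sorted[end] == depths_sorted[start]`; fuel (n-e).toNat bounds the iterations
def runEndB (l : List Int) (s : Int) : Nat → Int → Int
  | 0, e => e
  | fuel + 1, e =>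
    if e < (l.length : Int) ∧ PySem.List.pyGet? l e = PySem.List.pyGet? l s then
      runEndB l s fuel (e + 1)
    else e

-- chunk-emitting `while j < end` loop; fuel (e-j).toNat bounds the iterations when the
-- chunk sizes are ≥ 1, i.e. whenever max_group_size ≥ 1 (Python loops forever otherwise)
def chunkB (m : Int) : Nat → Int → Int → Int → List (List Int)
  | 0, _, _, _ => []
  | fuel + 1, j, e, size =>
    if j < e then PySem.List.pyRange j (j + size) 1 :: chunkB m fuel (j + size) e m
    else []

-- outer `while start < n` loop; acc is `groups`
def outerB (l : List Int) (m : Int) : Nat → Int → List (List Int) → List (List Int)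
  | 0, _, acc => acc
  | fuel + 1, start, acc =>
    if start < (l.length : Int) then
      let e := runEndB l start ((l.length : Int) - (start + 1)).toNat (start + 1)
      -- `(end - start) % max_group_size or max_group_size`; m = 0 raises ZeroDivisionError in Python (outside Pre_)
      let r := PySem.Int.mod (e - start) m
      outerB l m fuel e (acc ++ chunkB m (e - start).toNat start e (if r = 0 then m else r))
    else acc

def dhs_group_by_depth_alt (depths_sorted : List Int) (max_group_size : Int) : List (List Int) :=
  outerB depths_sorted max_group_size depths_sorted.length 0 []

-- ===== PRECONDITION & SPEC =====
-- Pre_ excludes only nonempty inputs with max_group_size ≤ 0: there A's inner loop can never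
-- add an element, so A appends empty groups forever and never returns (infinite loop);
-- B raises ZeroDivisionError (m = 0) or loops as well.  A returns on everything Pre_ admits.
def Pre_dhs_group_by_depth (depths_sorted : List Int) (max_group_size : Int) : Prop :=
  depths_sorted = [] ∨ 1 ≤ max_group_size
instance (depths_sorted : List Int) (max_group_size : Int) : Decidable (Pre_dhs_group_by_depth depths_sorted max_group_size) := by unfold Pre_dhs_group_by_depth; infer_instance

def pvWitness_dhs_group_by_depth : List Int × Int := ([3, 3, 2, 2, 2, 1], 2)

def Spec_dhs_group_by_depth (depths_sorted : List Int) (max_group_size : Int) (out : List (List Int)) : Prop := out = dhs_group_by_depth_alt depths_sorted max_group_size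
instance (depths_sorted : List Int) (max_group_size : Int) (out : List (List Int)) : Decidable (Spec_dhs_group_by_depth depths_sorted max_group_size out) := by unfold Spec_dhs_group_by_depth; infer_instance

-- ===== CLAIM (what is proved, stated in full; the proofs are below) =====
def Claim_equal_dhs_group_by_depth : Prop := ∀ (depths_sorted : List Int) (max_group_size : Int), Dom_dhs_group_by_depth depths_sorted max_group_size → Pre_dhs_group_by_depth depths_sorted max_group_size → Spec_dhs_group_by_depth depths_sorted max_group_size (dhs_group_by_depth depths_sorted max_group_size)

-- ===== LEMMAS AND PROOFS =====

-- first-chunk size of a run of length L: L % m, or m when that remainder is 0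
def fsize (m L : Int) : Int := if L % m = 0 then m else L % m

-- maximal runs of equal consecutive values, as (value, length) pairs
def runsAux (l : List Int) : List (Int × Nat) :=
  match l with
  | [] => []
  | x :: xs =>
    (x, (xs.takeWhile (fun y => y == x)).length + 1) ::
      runsAux (xs.dropWhile (fun y => y == x))
termination_by l.length
decreasing_by
  have := List.length_dropWhile_le (fun y => y == x) xs
  simp only [List.length_cons]
  omega

def sumL (rs : List (Int × Nat)) : Nat := (rs.map (·.2)).sum

-- the meeting point of the two proofs: concatenated remainder-first chunk lists of the runs
def specGo (m : Int) (s : Int) : List (Int × Nat) → List (List Int)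
  | [] => []
  | (_, L) :: rs => chunkB m L s (s + (L : Int)) (fsize m (L : Int)) ++ specGo m (s + (L : Int)) rs

theorem fsize_pos {m : Int} (hm : 0 < m) (L : Int) : 0 < fsize m L := by
  unfold fsize
  split
  · exact hm
  · rename_i h
    have := Int.emod_nonneg L (by omega : m ≠ 0)
    omega

theorem fsize_le {m : Int} (hm : 0 < m) (L : Int) : fsize m L ≤ m := by
  unfold fsize
  split
  · exact le_refl m
  · have := Int.emod_lt_of_pos L hm
    omega

theorem chunkB_stop {m : Int} (fuel : Nat) (j e size : Int) (h : e ≤ j) :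
    chunkB m fuel j e size = [] := by
  cases fuel with
  | zero => rfl
  | succ f => simp only [chunkB, if_neg (by omega : ¬ j < e)]

theorem chunkB_fuel_congr {m : Int} (hm : 0 < m) (fuel fuel' : Nat) (j e size : Int)
    (hs : 0 < size) (h1 : (e - j).toNat ≤ fuel) (h2 : (e - j).toNat ≤ fuel') :
    chunkB m fuel j e size = chunkB m fuel' j e size := by
  by_cases hje : j < e
  · obtain ⟨f, rfl⟩ : ∃ f, fuel = f + 1 := ⟨fuel - 1, by omega⟩
    obtain ⟨f', rfl⟩ : ∃ f', fuel' = f' + 1 := ⟨fuel' - 1, by omega⟩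
    simp only [chunkB, if_pos hje]
    exact congrArg _ (chunkB_fuel_congr hm f f' (j + size) e m hm (by omega) (by omega))
  · rw [chunkB_stop _ _ _ _ (by omega), chunkB_stop _ _ _ _ (by omega)]
termination_by (e - j).toNat
decreasing_by omega

theorem chunkB_single {m j e : Int} (hm : 0 < m) (h1 : 0 < e - j) (h2 : e - j ≤ m) :
    chunkB m (e - j).toNat j e (fsize m (e - j)) = [PySem.List.pyRange j e 1] := by
  have hf : fsize m (e - j) = e - j := by
    unfold fsize
    split
    · rename_i h0
      have hdvd : m ∣ (e - j) := Int.dvd_of_emod_eq_zero h0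
      have := Int.le_of_dvd h1 hdvd
      omega
    · rename_i h0
      have hne : e - j ≠ m := fun hEq => h0 (by rw [hEq]; exact Int.emod_self)
      exact Int.emod_eq_of_lt (by omega) (by omega)
  obtain ⟨t, ht⟩ : ∃ t, (e - j).toNat = t + 1 := ⟨(e - j).toNat - 1, by omega⟩
  rw [ht, hf]
  simp only [chunkB, if_pos (by omega : j < e)]
  rw [show j + (e - j) = e by ring, chunkB_stop _ _ _ _ le_rfl]

theorem chunkB_full_snoc {m : Int} (hm : 0 < m) (j e : Int) (hge : m ≤ e - j)
    (hdvd : (e - j) % m = 0) :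
    chunkB m (e - j).toNat j e m =
      chunkB m (e - m - j).toNat j (e - m) m ++ [PySem.List.pyRange (e - m) e 1] := by
  obtain ⟨t, ht⟩ : ∃ t, (e - j).toNat = t + 1 := ⟨(e - j).toNat - 1, by omega⟩
  rw [ht]
  simp only [chunkB, if_pos (by omega : j < e)]
  by_cases heq : e - j = m
  · have hjm : j + m = e := by omega
    rw [hjm, chunkB_stop _ _ _ _ le_rfl,
      chunkB_stop _ _ _ _ (by omega : e - m ≤ j),
      show e - m = j by omega, List.nil_append]
  · -- e - j > m, and m ∣ e - j - m, so e - j - m ≥ m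
    have hdvd' : (e - j - m) % m = 0 := by
      rw [Int.sub_emod, hdvd, Int.emod_self]
      simp
    have hge' : m ≤ e - j - m := by
      have h1 : 0 < e - j - m := by omega
      have h2 : m ∣ (e - j - m) := Int.dvd_of_emod_eq_zero hdvd'
      exact Int.le_of_dvd h1 h2
    have ih := chunkB_full_snoc hm (j + m) e (by omega)
      (by rw [show e - (j + m) = e - j - m by ring]; exact hdvd')
    rw [show e - (j + m) = e - j - m by ring] at ih
    rw [chunkB_fuel_congr hm t (e - j - m).toNat (j + m) e m hm (by omega) (by omega), ih]
    -- now unfold the RHS once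
    obtain ⟨t', ht'⟩ : ∃ t', (e - m - j).toNat = t' + 1 := ⟨(e - m - j).toNat - 1, by omega⟩
    rw [ht']
    simp only [chunkB, if_pos (by omega : j < e - m)]
    rw [chunkB_fuel_congr hm t' (e - m - (j + m)).toNat (j + m) (e - m) m hm (by omega) (by omega),
      show e - m - (j + m) = e - j - m - m by ring, List.cons_append]
termination_by (e - j).toNat
decreasing_by omega

theorem chunkB_snoc {m j e : Int} (hm : 0 < m) (h : m < e - j) :
    chunkB m (e - j).toNat j e (fsize m (e - j)) =
      chunkB m (e - m - j).toNat j (e - m) (fsize m (e - j - m)) ++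
        [PySem.List.pyRange (e - m) e 1] := by
  have hmod : (e - j - m) % m = (e - j) % m := by
    rw [Int.sub_emod, Int.emod_self]
    simp [Int.emod_emod_of_dvd]
  have hfs : fsize m (e - j - m) = fsize m (e - j) := by
    unfold fsize; rw [hmod]
  set f := fsize m (e - j) with hf
  have hfpos : 0 < f := fsize_pos hm _
  have hfle : f ≤ m := fsize_le hm _
  -- the remaining length after the first chunk is a positive multiple of m
  have hrem0 : (e - j - f) % m = 0 := by
    rw [hf]
    unfold fsize
    split
    · rename_i h0
      rw [Int.sub_emod, h0, Int.emod_self]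
      simp
    · conv_lhs => rw [Int.emod_def (e - j) m]
      rw [show e - j - (e - j - m * ((e - j) / m)) = m * ((e - j) / m) by ring]
      exact Int.mul_emod_right _ _
  have hrem_pos : 0 < e - j - f := by omega
  have hrem_ge : m ≤ e - j - f :=
    Int.le_of_dvd hrem_pos (Int.dvd_of_emod_eq_zero hrem0)
  -- unfold the LHS once
  obtain ⟨t, ht⟩ : ∃ t, (e - j).toNat = t + 1 := ⟨(e - j).toNat - 1, by omega⟩
  rw [ht]
  simp only [chunkB, if_pos (by omega : j < e)]
  rw [chunkB_fuel_congr hm t (e - (j + f)).toNat (j + f) e m hm (by omega) (by omega)]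
  have hfull := chunkB_full_snoc hm (j + f) e
    (by rw [show e - (j + f) = e - j - f by ring]; omega)
    (by rw [show e - (j + f) = e - j - f by ring]; exact hrem0)
  rw [hfull]
  -- unfold the RHS once
  rw [hfs]
  obtain ⟨t', ht'⟩ : ∃ t', (e - m - j).toNat = t' + 1 := ⟨(e - m - j).toNat - 1, by omega⟩
  rw [ht']
  simp only [chunkB, if_pos (by omega : j < e - m)]
  rw [chunkB_fuel_congr hm t' (e - m - (j + f)).toNat (j + f) (e - m) m hm (by omega) (by omega),
    show e - m - (j + f) = e - (j + f) - m by ring, List.cons_append]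

theorem innerA_snd_le {l : List Int} {gd m : Int} :
    ∀ (fuel : Nat) (i : Int) (g : List Int), (innerA l gd m fuel i g).2 ≤ i := by
  intro fuel
  induction fuel with
  | zero => intro i g; exact le_refl i
  | succ f ih =>
    intro i g
    simp only [innerA]
    split
    · exact le_trans (ih (i - 1) (g ++ [i])) (by omega)
    · exact le_refl i

theorem pyGet?_append_lt {l' r : List Int} {j : Int} (h0 : 0 ≤ j) (h : j < (l'.length : Int)) :
    PySem.List.pyGet? (l' ++ r) j = PySem.List.pyGet? l' j := by
  rw [PySem.List.pyGet?_of_nonneg _ h0, PySem.List.pyGet?_of_nonneg _ h0,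
    List.getElem?_append_left (by omega)]

theorem innerA_congr {l' r : List Int} {gd m : Int} :
    ∀ (fuel : Nat) (i : Int) (g : List Int), i < (l'.length : Int) →
      innerA (l' ++ r) gd m fuel i g = innerA l' gd m fuel i g := by
  intro fuel
  induction fuel with
  | zero => intro i g _; rfl
  | succ f ih =>
    intro i g hi
    by_cases h0 : 0 ≤ i
    · simp only [innerA, pyGet?_append_lt h0 hi]
      split
      · exact ih (i - 1) (g ++ [i]) (by omega)
      · rfl
    · simp only [innerA]
      rw [if_neg (by tauto), if_neg (by tauto)]

theorem outerA_congr {l' r : List Int} {m : Int} :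
    ∀ (fuel : Nat) (i : Int) (acc : List (List Int)), i < (l'.length : Int) →
      outerA (l' ++ r) m fuel i acc = outerA l' m fuel i acc := by
  intro fuel
  induction fuel with
  | zero => intro i acc _; rfl
  | succ f ih =>
    intro i acc hi
    simp only [outerA]
    by_cases h0 : 0 ≤ i
    · rw [if_pos h0, if_pos h0, pyGet?_append_lt h0 hi]
      cases hget : PySem.List.pyGet? l' i with
      | none => rfl
      | some gd =>
        dsimp only
        rw [innerA_congr _ _ _ hi]
        exact ih _ _ (lt_of_le_of_lt (innerA_snd_le _ _ _) hi)
    · rw [if_neg h0, if_neg h0]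

theorem outerA_acc {l : List Int} {m : Int} :
    ∀ (fuel : Nat) (i : Int) (acc : List (List Int)),
      outerA l m fuel i acc = acc ++ outerA l m fuel i [] := by
  intro fuel
  induction fuel with
  | zero => intro i acc; simp [outerA]
  | succ f ih =>
    intro i acc
    simp only [outerA]
    by_cases h0 : 0 ≤ i
    · rw [if_pos h0, if_pos h0]
      cases hget : PySem.List.pyGet? l i with
      | none => simp
      | some gd =>
        dsimp only
        rw [ih ((innerA l gd m (i + 1).toNat i []).2)
            (acc ++ [PySem.List.sorted (innerA l gd m (i + 1).toNat i []).1 (fun x => x) false]),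
          ih ((innerA l gd m (i + 1).toNat i []).2)
            ([] ++ [PySem.List.sorted (innerA l gd m (i + 1).toNat i []).1 (fun x => x) false])]
        simp
    · rw [if_neg h0, if_neg h0]
      simp

theorem innerA_run {l : List Int} {v m p : Int} (hp : 0 ≤ p)
    (hb : p = 0 ∨ PySem.List.pyGet? l (p - 1) ≠ some v) :
    ∀ (i : Int) (g : List Int), p ≤ i →
      (∀ j : Int, p ≤ j → j ≤ i → PySem.List.pyGet? l j = some v) →
      (g.length : Int) ≤ m →
      innerA l v m (i + 1).toNat i g =
        (g ++ (PySem.List.pyRange (i - min (m - (g.length : Int)) (i - p + 1) + 1) (i + 1) 1).reverse,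
         i - min (m - (g.length : Int)) (i - p + 1)) := by
  intro i g hpi hrun hg
  have hi0 : 0 ≤ i := le_trans hp hpi
  have hget : PySem.List.pyGet? l i = some v := hrun i hpi le_rfl
  obtain ⟨t, ht⟩ : ∃ t, (i + 1).toNat = t + 1 := ⟨i.toNat, by omega⟩
  rw [ht]
  simp only [innerA]
  by_cases hlen : (g.length : Int) < m
  · rw [if_pos ⟨hi0, hget, hlen⟩]
    by_cases hip : i = p
    · -- last element of the run: one more append, then the loop stops at p - 1
      subst hip
      have hstop : innerA l v m t (i - 1) (g ++ [i]) = (g ++ [i], i - 1) := by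
        cases t with
        | zero => rfl
        | succ t' =>
          simp only [innerA]
          rw [if_neg (by
            rintro ⟨hc1, hc2, _⟩
            rcases hb with hb0 | hbne
            · omega
            · exact hbne hc2)]
      rw [hstop]
      have hmin : min (m - (g.length : Int)) (i - i + 1) = 1 := by omega
      rw [hmin]
      rw [show i - 1 + 1 = i by ring, PySem.List.pyRange_one_singleton]
      rfl
    · -- middle of the run: recurse at i - 1
      have hpi' : p ≤ i - 1 := by omega
      have ht' : t = ((i - 1) + 1).toNat := by omega
      rw [ht']
      rw [innerA_run hp hb (i - 1) (g ++ [i]) hpi'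
        (fun j hj1 hj2 => hrun j hj1 (by omega))
        (by simp only [List.length_append, List.length_cons, List.length_nil]; push_cast; omega)]
      have hlg : (((g ++ [i]).length : Nat) : Int) = (g.length : Int) + 1 := by
        simp only [List.length_append, List.length_cons, List.length_nil]; push_cast; ring
      rw [hlg]
      set s := min (m - (g.length : Int)) (i - p + 1) with hsdef
      set s' := min (m - ((g.length : Int) + 1)) (i - 1 - p + 1) with hs'def
      have hs : s = s' + 1 := by omega
      have hs1 : 1 ≤ s := by omega
      rw [Prod.mk.injEq]
      refine ⟨?_, by omega⟩
      rw [show i - 1 + 1 = i by ring, show i - 1 - s' + 1 = i - s + 1 by omega]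
      have hrange : PySem.List.pyRange (i - s + 1) (i + 1) 1
          = PySem.List.pyRange (i - s + 1) i 1 ++ [i] :=
        PySem.List.pyRange_one_succ_right (by omega)
      rw [hrange, List.reverse_append]
      simp
  · rw [if_neg (by rintro ⟨_, _, hc⟩; exact hlen hc)]
    have hmin : min (m - (g.length : Int)) (i - p + 1) = 0 := by omega
    rw [hmin, show i - 0 + 1 = i + 1 by ring,
      PySem.List.pyRange_one_eq_nil (le_refl (i + 1))]
    simp
termination_by i => (i - p).toNat
decreasing_by omega

theorem innerA_snd_lt {l : List Int} {gd m i : Int} (hm : 1 ≤ m) (h0 : 0 ≤ i)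
    (hget : PySem.List.pyGet? l i = some gd) :
    (innerA l gd m (i + 1).toNat i []).2 < i := by
  obtain ⟨t, ht⟩ : ∃ t, (i + 1).toNat = t + 1 := ⟨i.toNat, by omega⟩
  rw [ht]
  simp only [innerA, List.length_nil]
  rw [if_pos ⟨h0, hget, by omega⟩]
  exact lt_of_le_of_lt (innerA_snd_le _ _ _) (by omega)

theorem outerA_neg {l : List Int} {m : Int} (fuel : Nat) (i : Int) (acc : List (List Int))
    (h : i < 0) : outerA l m fuel i acc = acc := by
  cases fuel with
  | zero => rfl
  | succ f => simp only [outerA, if_neg (by omega : ¬ 0 ≤ i)]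

theorem outerA_fuel_congr {l : List Int} {m : Int} (hm : 1 ≤ m)
    (fuel fuel' : Nat) (i : Int) (acc : List (List Int))
    (h1 : (i + 2).toNat ≤ fuel) (h2 : (i + 2).toNat ≤ fuel') :
    outerA l m fuel i acc = outerA l m fuel' i acc := by
  by_cases h0 : 0 ≤ i
  · obtain ⟨f, rfl⟩ : ∃ f, fuel = f + 1 := ⟨fuel - 1, by omega⟩
    obtain ⟨f', rfl⟩ : ∃ f', fuel' = f' + 1 := ⟨fuel' - 1, by omega⟩
    simp only [outerA, if_pos h0]
    cases hget : PySem.List.pyGet? l i with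
    | none => rfl
    | some gd =>
      have hlt := innerA_snd_lt (l := l) hm h0 hget
      dsimp only
      refine outerA_fuel_congr hm f f' _ _ ?_ ?_ <;> omega
  · rw [outerA_neg _ _ _ (by omega), outerA_neg _ _ _ (by omega)]
termination_by (i + 1).toNat
decreasing_by
  have := innerA_snd_le (l := l) (gd := gd) (m := m) (i + 1).toNat i []
  omega

theorem outerA_run {l : List Int} {m v p : Int} (hm : 1 ≤ m) (hp : 0 ≤ p)
    (hb : p = 0 ∨ PySem.List.pyGet? l (p - 1) ≠ some v) :
    ∀ (i : Int) (acc : List (List Int)) (fuel : Nat), p ≤ i →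
      (∀ j : Int, p ≤ j → j ≤ i → PySem.List.pyGet? l j = some v) →
      (i + 2).toNat ≤ fuel →
      outerA l m fuel i acc =
        outerA l m (p + 1).toNat (p - 1)
          (acc ++ (chunkB m (i + 1 - p).toNat p (i + 1) (fsize m (i + 1 - p))).reverse) := by
  intro i acc fuel hpi hrun hfuel
  have hi0 : 0 ≤ i := le_trans hp hpi
  obtain ⟨f, rfl⟩ : ∃ f, fuel = f + 1 := ⟨fuel - 1, by omega⟩
  simp only [outerA, if_pos hi0]
  have hget : PySem.List.pyGet? l i = some v := hrun i hpi le_rfl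
  rw [hget]
  dsimp only
  have hinner := innerA_run (m := m) hp hb i [] hpi hrun
    (by simp only [List.length_nil, Nat.cast_zero]; omega)
  simp only [List.length_nil, Nat.cast_zero, sub_zero, List.nil_append] at hinner
  rw [hinner]
  dsimp only
  have hsort : PySem.List.sorted
      ((PySem.List.pyRange (i - min m (i - p + 1) + 1) (i + 1) 1).reverse) (fun x => x) false
      = PySem.List.pyRange (i - min m (i - p + 1) + 1) (i + 1) 1 :=
    PySem.List.sorted_eq_of_perm_of_pairwise_lt _ _ _ (List.reverse_perm _).symm
      (PySem.List.pairwise_lt_pyRange_one _ _)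
  rw [hsort]
  by_cases hcase : i - p + 1 ≤ m
  · -- the whole remaining run fits into one group
    have hsmin : min m (i - p + 1) = i - p + 1 := by omega
    rw [hsmin, show i - (i - p + 1) = p - 1 by ring, show p - 1 + 1 = p by ring]
    rw [chunkB_single (by omega) (by omega : 0 < i + 1 - p) (by omega)]
    rw [outerA_fuel_congr hm f (p + 1).toNat (p - 1) _ (by omega) (by omega)]
    rfl
  · -- the group takes max_group_size elements off the top; recurse on the rest
    have hsmin : min m (i - p + 1) = m := by omega
    rw [hsmin]
    have hrec := outerA_run hm hp hb (i - m)
      (acc ++ [PySem.List.pyRange (i - m + 1) (i + 1) 1]) f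
      (by omega)
      (fun j hj1 hj2 => hrun j hj1 (by omega))
      (by omega)
    rw [hrec]
    have hsnoc := chunkB_snoc (m := m) (j := p) (e := i + 1) (by omega) (by omega)
    rw [show i + 1 - m - p = i - m + 1 - p by ring, show i + 1 - m = i - m + 1 by ring,
      show i + 1 - p - m = i - m + 1 - p by ring] at hsnoc
    rw [hsnoc, List.reverse_append]
    simp
termination_by i => (i - p).toNat
decreasing_by omega

theorem dropWhile_eq_drop {α : Type} (p : α → Bool) (xs : List α) :
    xs.dropWhile p = xs.drop (xs.takeWhile p).length := by
  induction xs with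
  | nil => rfl
  | cons x xs ih =>
    by_cases hp : p x
    · simp [hp, ih]
    · simp [hp]

theorem runsAux_sum (l : List Int) : sumL (runsAux l) = l.length := by
  match l with
  | [] => simp [runsAux, sumL]
  | x :: xs =>
    rw [runsAux]
    have ih := runsAux_sum (xs.dropWhile (fun y => y == x))
    have hsplit := List.takeWhile_append_dropWhile (p := fun y => y == x) (l := xs)
    have : (xs.takeWhile (fun y => y == x)).length + (xs.dropWhile (fun y => y == x)).length
        = xs.length := by
      rw [← List.length_append, hsplit]
    simp only [sumL, List.map_cons, List.sum_cons, List.length_cons] at *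
    omega
termination_by l.length
decreasing_by
  have := List.length_dropWhile_le (fun y => y == x) xs
  simp only [List.length_cons]
  omega

theorem specGo_append (m : Int) :
    ∀ (rs rs' : List (Int × Nat)) (s : Int),
      specGo m s (rs ++ rs') = specGo m s rs ++ specGo m (s + (sumL rs : Int)) rs' := by
  intro rs
  induction rs with
  | nil => intro rs' s; simp [specGo, sumL]
  | cons hd tl ih =>
    intro rs' s
    obtain ⟨v, L⟩ := hd
    have hcast : s + (L : Int) + (sumL tl : Int) = s + ((sumL ((v, L) :: tl) : Nat) : Int) := by
      simp only [sumL, List.map_cons, List.sum_cons]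
      push_cast
      ring
    simp only [List.cons_append, specGo, ih, List.append_assoc, hcast]

theorem runsAux_replicate {v : Int} {k : Nat} (hk : 1 ≤ k) :
    runsAux (List.replicate k v) = [(v, k)] := by
  obtain ⟨k', rfl⟩ : ∃ k', k = k' + 1 := ⟨k - 1, by omega⟩
  rw [List.replicate_succ, runsAux]
  simp [runsAux]

theorem runsAux_append_run {l' : List Int} {v : Int} {k : Nat} (hk : 1 ≤ k)
    (hb : l' = [] ∨ l'.getLast? ≠ some v) :
    runsAux (l' ++ List.replicate k v) = runsAux l' ++ [(v, k)] := by
  match l' with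
  | [] => simp [runsAux_replicate hk, runsAux]
  | x :: xs =>
    have hb' : (x :: xs).getLast? ≠ some v := by
      rcases hb with h | h
      · exact absurd h (List.cons_ne_nil x xs)
      · exact h
    rw [List.cons_append, runsAux, List.takeWhile_append, List.dropWhile_append]
    by_cases hall : (List.takeWhile (fun y => y == x) xs).length = xs.length
    · -- every element of xs equals x, so the appended run starts a fresh runsAux block
      have htw : List.takeWhile (fun y => y == x) xs = xs :=
        (List.takeWhile_sublist _).eq_of_length hall
      have hxall : ∀ y ∈ xs, (y == x) = true := List.takeWhile_eq_self_iff.mp htw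
      have hxv : x ≠ v := by
        have hne : (x :: xs) ≠ [] := List.cons_ne_nil x xs
        have hlast := List.getLast_mem hne
        have hlx : (x :: xs).getLast hne = x := by
          rcases List.mem_cons.mp hlast with h | h
          · exact h
          · exact eq_of_beq (hxall _ h)
        intro hcon
        apply hb'
        rw [List.getLast?_eq_some_getLast hne, hlx, hcon]
      have htwrep : List.takeWhile (fun y => y == x) (List.replicate k v) = [] := by
        rw [List.takeWhile_replicate, if_neg (by simp [hxv.symm])]
      have hdw : List.dropWhile (fun y => y == x) xs = [] :=
        List.dropWhile_eq_nil_iff.mpr hxall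
      have hdwrep : List.dropWhile (fun y => y == x) (List.replicate k v) =
          List.replicate k v := by
        rw [List.dropWhile_replicate, if_neg (by simp [hxv.symm])]
      rw [if_pos hall, htwrep, hdw, hdwrep, runsAux, htw, hdw]
      simp [runsAux_replicate hk, runsAux]
    · -- the tail of xs continues past x; recurse on the strictly shorter dropWhile remainder
      have hdwne : List.dropWhile (fun y => y == x) xs ≠ [] := by
        intro hcon
        apply hall
        have := List.takeWhile_append_dropWhile (p := fun y => y == x) (l := xs)
        rw [hcon, List.append_nil] at this
        rw [this]
      have hisE : (List.dropWhile (fun y => y == x) xs).isEmpty ≠ true := by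
        simp [List.isEmpty_iff, hdwne]
      obtain ⟨d, hd⟩ : ∃ d, (List.dropWhile (fun y => y == x) xs).getLast? = some d := by
        have := List.getLast?_isSome.mpr hdwne
        exact Option.isSome_iff_exists.mp this
      have hxsne : xs ≠ [] := by
        intro hcon
        rw [hcon] at hdwne
        exact hdwne rfl
      have hlast_xs : xs.getLast? = some d := by
        conv_lhs => rw [← List.takeWhile_append_dropWhile (p := fun y => y == x) (l := xs)]
        rw [List.getLast?_append, hd]
        rfl
      have hlast_l' : (x :: xs).getLast? = some d := by
        rw [show x :: xs = [x] ++ xs by rfl, List.getLast?_append, hlast_xs]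
        rfl
      have hdv : d ≠ v := by
        intro hcon
        exact hb' (by rw [hlast_l', hcon])
      have ih := runsAux_append_run (l' := List.dropWhile (fun y => y == x) xs) (v := v) hk
        (Or.inr (by rw [hd]; simp [hdv]))
      rw [if_neg hall, if_neg hisE, ih, runsAux]
      simp
termination_by l'.length
decreasing_by
  have := List.length_dropWhile_le (fun y => y == x) xs
  simp only [List.length_cons]
  omega

theorem mainA {m : Int} (hm : 1 ≤ m) :
    ∀ (l : List Int) (fuel : Nat), l.length + 1 ≤ fuel →
      outerA l m fuel ((l.length : Int) - 1) [] = (specGo m 0 (runsAux l)).reverse := by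
  intro l fuel hfuel
  by_cases hnil : l = []
  · subst hnil
    rw [outerA_neg _ _ _ (by simp)]
    simp [runsAux, specGo]
  · have hne : l ≠ [] := hnil
    set v := l.getLast hne with hv
    set tw := l.reverse.takeWhile (fun y => y == v) with htwdef
    set dw := l.reverse.dropWhile (fun y => y == v) with hdwdef
    set k := tw.length with hkdef
    set l₀ := dw.reverse with hl0def
    have htwrep : tw = List.replicate k v := by
      apply List.eq_replicate_of_mem
      intro b hbmem
      rw [htwdef] at hbmem
      exact eq_of_beq (List.mem_takeWhile_imp (p := fun y => y == v) hbmem)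
    have hsplit : l = l₀ ++ List.replicate k v := by
      conv_lhs => rw [← List.reverse_reverse l,
        ← List.takeWhile_append_dropWhile (p := fun y => y == v) (l := l.reverse)]
      rw [← htwdef, ← hdwdef, List.reverse_append, htwrep, List.reverse_replicate, ← hl0def]
    have hk1 : 1 ≤ k := by
      have hrevne : l.reverse ≠ [] := by simp [hne]
      have hhead : l.reverse.head? = some v := by
        rw [List.head?_reverse, List.getLast?_eq_some_getLast hne]
      cases hcase : l.reverse with
      | nil => exact absurd hcase hrevne
      | cons a t =>
        have hav : a = v := by
          rw [hcase] at hhead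
          simpa using hhead
        rw [hkdef, htwdef, hcase, List.takeWhile_cons, if_pos (by simp [hav])]
        simp
    have hlen : l.length = l₀.length + k := by
      conv_lhs => rw [hsplit]
      simp
    have hb : l₀ = [] ∨ l₀.getLast? ≠ some v := by
      by_cases hdwnil : dw = []
      · left; simp [hl0def, hdwnil]
      · right
        rw [hl0def, List.getLast?_reverse]
        have hlem : ∀ (p : Int → Bool) (L : List Int) (a : Int) (t : List Int),
            L.dropWhile p = a :: t → p a = false := by
          intro p L a t h
          have hne' : L.dropWhile p ≠ [] := by rw [h]; simp
          have hnot := List.head_dropWhile_not p hne'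
          have hh : (L.dropWhile p).head hne' = a := by simp [h]
          rw [hh] at hnot
          exact hnot
        cases hcase : dw with
        | nil => exact absurd hcase hdwnil
        | cons a t =>
          have hpa : (a == v) = false :=
            hlem (fun y => y == v) l.reverse a t (hdwdef.symm.trans hcase)
          simp only [List.head?_cons]
          intro hcon
          rw [Option.some.injEq] at hcon
          rw [hcon] at hpa
          simp at hpa
    have hrun : ∀ j : Int, (l₀.length : Int) ≤ j → j ≤ (l.length : Int) - 1 →
        PySem.List.pyGet? l j = some v := by
      intro j h1 h2
      have h0j : 0 ≤ j := le_trans (by positivity) h1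
      rw [PySem.List.pyGet?_of_nonneg _ h0j]
      conv_lhs => rw [hsplit]
      rw [List.getElem?_append_right (by omega)]
      rw [List.getElem?_replicate, if_pos (by omega)]
    have hbdry : (l₀.length : Int) = 0 ∨
        PySem.List.pyGet? l ((l₀.length : Int) - 1) ≠ some v := by
      by_cases hl0nil : l₀ = []
      · left; simp [hl0nil]
      · right
        have hlpos : 0 < l₀.length := List.length_pos_of_ne_nil hl0nil
        rw [PySem.List.pyGet?_of_nonneg _ (by omega)]
        conv_lhs => rw [hsplit]
        rw [List.getElem?_append_left (by omega)]
        rw [show ((l₀.length : Int) - 1).toNat = l₀.length - 1 by omega]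
        rw [← List.getLast?_eq_getElem?]
        rcases hb with h | h
        · exact absurd h hl0nil
        · exact h
    have hA := outerA_run (l := l) hm (by positivity) hbdry ((l.length : Int) - 1) [] fuel
      (by omega) hrun (by omega)
    rw [hA, outerA_acc, List.nil_append]
    have hcongr : outerA l m ((l₀.length : Int) + 1).toNat ((l₀.length : Int) - 1) []
        = outerA l₀ m ((l₀.length : Int) + 1).toNat ((l₀.length : Int) - 1) [] := by
      conv_lhs => rw [hsplit]
      exact outerA_congr _ _ _ (by omega)
    rw [hcongr]
    have hfl0 : ((l₀.length : Int) + 1).toNat = l₀.length + 1 := by omega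
    have hdec : l₀.length < l.length := by omega
    rw [hfl0, mainA hm l₀ (l₀.length + 1) le_rfl]
    -- right-hand side: split off the last run
    conv_rhs => rw [hsplit, runsAux_append_run hk1 hb, specGo_append, runsAux_sum]
    have hnp : (l.length : Int) - 1 + 1 - (l₀.length : Int) = ((k : Nat) : Int) := by
      push_cast [hlen]; ring
    have hnp2 : (l.length : Int) - 1 + 1 = 0 + (l₀.length : Int) + ((k : Nat) : Int) := by
      push_cast [hlen]; ring
    rw [hnp, hnp2]
    simp only [specGo, List.append_nil, List.reverse_append]
    rw [show ((k : Nat) : Int).toNat = k by omega,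
      show (0 : Int) + (l₀.length : Int) = (l₀.length : Int) by ring]
termination_by l => l.length
decreasing_by
  exact hdec

theorem runEnd_spec {l : List Int} {s : Int} {x : Int} (hx : PySem.List.pyGet? l s = some x) :
    ∀ (e : Int), 0 ≤ e →
      runEndB l s ((l.length : Int) - e).toNat e =
        e + (((l.drop e.toNat).takeWhile (fun y => y == x)).length : Int) := by
  intro e he0
  by_cases he : e < (l.length : Int)
  · obtain ⟨y, hy⟩ : ∃ y, PySem.List.pyGet? l e = some y := by
      rw [PySem.List.pyGet?_eq_some_getElem l he0 he]
      exact ⟨_, rfl⟩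
    have h1 : l[e.toNat]? = some y := by
      rw [← PySem.List.pyGet?_of_nonneg l he0]
      exact hy
    obtain ⟨hltN, hgetN⟩ := List.getElem?_eq_some_iff.mp h1
    have hdrop : l.drop e.toNat = y :: l.drop (e.toNat + 1) := by
      rw [List.drop_eq_getElem_cons hltN, hgetN]
    obtain ⟨t, ht⟩ : ∃ t, ((l.length : Int) - e).toNat = t + 1 :=
      ⟨((l.length : Int) - e).toNat - 1, by omega⟩
    rw [ht]
    simp only [runEndB]
    by_cases hyx : y = x
    · rw [if_pos ⟨he, by rw [hy, hx, hyx]⟩]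
      have ht' : t = ((l.length : Int) - (e + 1)).toNat := by omega
      rw [ht', runEnd_spec hx (e + 1) (by omega)]
      rw [hdrop, show (e + 1).toNat = e.toNat + 1 by omega]
      simp only [List.takeWhile_cons, hyx, beq_self_eq_true, if_true, List.length_cons]
      push_cast
      ring
    · rw [if_neg (by
        rintro ⟨-, hc⟩
        rw [hy, hx] at hc
        exact hyx (Option.some.injEq .. ▸ hc))]
      rw [hdrop]
      simp only [List.takeWhile_cons]
      rw [if_neg (by simp [hyx])]
      simp
  · rw [show ((l.length : Int) - e).toNat = 0 by omega,
      List.drop_eq_nil_of_le (by omega)]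
    simp [runEndB]
termination_by e => ((l.length : Int) - e).toNat
decreasing_by omega

theorem mainB {l : List Int} {m : Int} (hm : 1 ≤ m) :
    ∀ (start : Int) (acc : List (List Int)) (fuel : Nat), 0 ≤ start →
      ((l.length : Int) - start).toNat ≤ fuel →
      outerB l m fuel start acc = acc ++ specGo m start (runsAux (l.drop start.toNat)) := by
  intro start acc fuel h0 hfuel
  by_cases hlt : start < (l.length : Int)
  · obtain ⟨f, rfl⟩ : ∃ f, fuel = f + 1 := ⟨fuel - 1, by omega⟩
    simp only [outerB, if_pos hlt]
    obtain ⟨x, hx⟩ : ∃ x, PySem.List.pyGet? l start = some x := by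
      rw [PySem.List.pyGet?_eq_some_getElem l h0 hlt]
      exact ⟨_, rfl⟩
    have h1 : l[start.toNat]? = some x := by
      rw [← PySem.List.pyGet?_of_nonneg l h0]
      exact hx
    obtain ⟨hltN, hgetN⟩ := List.getElem?_eq_some_iff.mp h1
    have hdrop : l.drop start.toNat = x :: l.drop (start.toNat + 1) := by
      rw [List.drop_eq_getElem_cons hltN, hgetN]
    have hre := runEnd_spec hx (start + 1) (by omega)
    rw [show (start + 1).toNat = start.toNat + 1 by omega] at hre
    set T := ((l.drop (start.toNat + 1)).takeWhile (fun y => y == x)).length with hT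
    rw [hre]
    have hTb : (T : Int) ≤ (l.length : Int) - start - 1 := by
      have h2 : T ≤ (l.drop (start.toNat + 1)).length := ((l.drop (start.toNat + 1)).takeWhile_sublist (fun y => y == x)).length_le
      have h3 : (l.drop (start.toNat + 1)).length = l.length - (start.toNat + 1) :=
        List.length_drop ..
      omega
    have he1 : (start + 1 + (T : Int) - start).toNat = T + 1 := by omega
    have he2 : start + ((T + 1 : Nat) : Int) = start + 1 + (T : Int) := by push_cast; ring
    have hsize : (if PySem.Int.mod (start + 1 + (T : Int) - start) m = 0 then m
        else PySem.Int.mod (start + 1 + (T : Int) - start) m) = fsize m ((T + 1 : Nat) : Int) := by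
      rw [PySem.Int.mod_eq_emod_of_pos (by omega)]
      unfold fsize
      rw [show start + 1 + (T : Int) - start = (T : Int) + 1 by ring]
      push_cast
      rfl
    rw [he1, hsize]
    rw [mainB hm (start + 1 + (T : Int))
      (acc ++ chunkB m (T + 1) start (start + 1 + (T : Int)) (fsize m ((T + 1 : Nat) : Int)))
      f (by omega) (by omega)]
    rw [hdrop, runsAux]
    simp only [specGo, he2, ← hT]
    rw [show (start + 1 + (T : Int)).toNat = start.toNat + 1 + T by omega,
      show start.toNat + 1 + T = start.toNat + 1 + T by rfl]
    rw [← List.drop_drop (i := T) (j := start.toNat + 1), ← dropWhile_eq_drop]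
    simp [List.append_assoc]
  · have hnil : l.drop start.toNat = [] := List.drop_eq_nil_of_le (by omega)
    rw [hnil]
    cases fuel with
    | zero => simp [outerB, runsAux, specGo]
    | succ f => simp [outerB, if_neg hlt, runsAux, specGo]
termination_by start => ((l.length : Int) - start).toNat
decreasing_by omega

-- ===== VERDICT (by name: the statement is the Claim_ definition above) =====
theorem dhs_group_by_depth_spec : Claim_equal_dhs_group_by_depth := by
  intro l m _ hpre
  unfold Spec_dhs_group_by_depth dhs_group_by_depth dhs_group_by_depth_alt
  rcases hpre with hnil | hm
  · subst hnil; rfl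
  · rw [mainA hm l (l.length + 1) le_rfl,
      mainB hm 0 [] l.length (by omega) (by omega)]
    simp
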